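-- pv_equiv track=rewrite | github.com/mlelarge/graph-conjectures | problems/unit_vector_flows/scripts/flower_cdc.py | _flower_relabel
-- ===== SOURCE A (Python) =====
-- def _flower_relabel(k: int) -> dict[tuple, int]:
--     """Reproduce the integer relabel used by ``flower_snark_with_labels``."""
--     n = 2 * k + 1
--     nodes: list[tuple] = []
--     for i in range(n):
--         nodes.append(("a", i))
--         nodes.append(("b", i))
--         nodes.append(("c", i))
--         nodes.append(("d", i))
--     nodes = sorted(nodes)
--     return {node: idx for idx, node in enumerate(nodes)}
-- ===== SOURCE B (Python) =====
-- def _flower_relabel(k: int) -> dict[tuple, int]: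
--     """Closed form: sorted order is letter-major, so ("x", i) gets index off(x)*n + i."""
--     n = 2 * k + 1
--     return {
--         (letter, i): off * n + i
--         for off, letter in enumerate(["a", "b", "c", "d"])
--         for i in range(n)
--     }
-- ===== Notes on version B (the rewrite author's own statement) =====
-- stated objective: alternative
-- what changed: Replaces build-then-sort-then-enumerate by a closed form: the sorted order is letter-major then index, so each node ('x', i) directly gets index offset(x)*n + i in one pass, with no sort (O(k) vs O(k log k); measured only ~1.4-1.6x, so not claimed as faster).
import Mathlib
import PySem

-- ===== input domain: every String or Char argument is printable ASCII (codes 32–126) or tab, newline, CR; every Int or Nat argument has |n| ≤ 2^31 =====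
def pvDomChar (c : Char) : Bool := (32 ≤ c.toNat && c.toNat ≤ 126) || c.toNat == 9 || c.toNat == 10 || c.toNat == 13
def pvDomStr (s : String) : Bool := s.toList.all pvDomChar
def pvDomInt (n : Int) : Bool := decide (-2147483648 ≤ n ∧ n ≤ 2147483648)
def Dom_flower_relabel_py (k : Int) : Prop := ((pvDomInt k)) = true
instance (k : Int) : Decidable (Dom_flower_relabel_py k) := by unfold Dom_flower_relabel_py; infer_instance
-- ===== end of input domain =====

-- B removes A's sort: in sorted order node ("x", i) sits at index offset(x)*n + i, so B emits the relabel dict directly in one pass.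


-- ===== PORT A =====
def flower_relabel_py (k : Int) : List (String × Int × Int) :=
  let n : Int := 2 * k + 1
  let nodes : List (String × Int) :=
    (PySem.List.pyRange 0 n 1).foldl
      (fun acc i => acc ++ [("a", i)] ++ [("b", i)] ++ [("c", i)] ++ [("d", i)]) []
  let nodes2 : List (String × Int) := PySem.List.sorted2 nodes (fun p => p.1) (fun p => p.2) false
  -- dict comprehension {node: idx for idx, node in enumerate(nodes)}; entries flattened to
  -- (letter, i, idx) per the dict[tuple,int] → List (String × Int × Int) convention
  let d : PySem.Dict (String × Int) Int :=
    (PySem.List.enumerate nodes2 0).foldl (fun d p => d.insert p.2 p.1) PySem.Dict.empty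
  d.items.map (fun q => (q.1.1, q.1.2, q.2))

-- ===== PORT B =====
def flower_relabel_py_alt (k : Int) : List (String × Int × Int) :=
  let n : Int := 2 * k + 1
  let pairs : List ((String × Int) × Int) :=
    (PySem.List.enumerate ["a", "b", "c", "d"] 0).flatMap
      (fun p => (PySem.List.pyRange 0 n 1).map (fun i => ((p.2, i), p.1 * n + i)))
  let d : PySem.Dict (String × Int) Int :=
    pairs.foldl (fun d q => d.insert q.1 q.2) PySem.Dict.empty
  d.items.map (fun q => (q.1.1, q.1.2, q.2))

-- ===== PRECONDITION & SPEC =====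
def Spec_flower_relabel_py (k : Int) (out : List (String × Int × Int)) : Prop := out = flower_relabel_py_alt k
instance (k : Int) (out : List (String × Int × Int)) : Decidable (Spec_flower_relabel_py k out) := by unfold Spec_flower_relabel_py; infer_instance

-- ===== CLAIM (what is proved, stated in full; the proofs are below) =====
def Claim_equal_flower_relabel_py : Prop := ∀ (k : Int), Dom_flower_relabel_py k → Spec_flower_relabel_py k (flower_relabel_py k)

-- ===== LEMMAS AND PROOFS =====

-- lexicographic order on the ("letter", i) nodes (what Python's tuple sort uses)
def lexLt (a b : String × Int) : Prop := a.1 < b.1 ∨ (a.1 = b.1 ∧ a.2 < b.2)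
def lexLe (a b : String × Int) : Prop := a.1 < b.1 ∨ (a.1 = b.1 ∧ a.2 ≤ b.2)
def lexBefore (a b : String × Int) : Bool :=
  decide (a.1 < b.1) || (!decide (b.1 < a.1) && decide (a.2 < b.2))

lemma lexBefore_true_iff (a b : String × Int) : lexBefore a b = true ↔ lexLt a b := by
  simp only [lexBefore, lexLt, Bool.or_eq_true, Bool.and_eq_true, Bool.not_eq_true',
    decide_eq_true_eq, decide_eq_false_iff_not]
  constructor
  · rintro (h | ⟨h1, h2⟩)
    · exact Or.inl h
    · rcases lt_trichotomy a.1 b.1 with h | h | h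
      · exact Or.inl h
      · exact Or.inr ⟨h, h2⟩
      · exact absurd h h1
  · rintro (h | ⟨h1, h2⟩)
    · exact Or.inl h
    · exact Or.inr ⟨by rw [h1]; exact lt_irrefl _, h2⟩

lemma lexLt_le {a b : String × Int} (h : lexLt a b) : lexLe a b := by
  rcases h with h | ⟨h1, h2⟩
  · exact Or.inl h
  · exact Or.inr ⟨h1, le_of_lt h2⟩

lemma lexLe_of_not_before {a b : String × Int} (h : lexBefore a b = false) : lexLe b a := by
  have h' : ¬ lexLt a b := by
    rw [← lexBefore_true_iff]; simp [h]
  simp only [lexLt, not_or, not_and, not_lt] at h'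
  rcases lt_trichotomy b.1 a.1 with h1 | h1 | h1
  · exact Or.inl h1
  · exact Or.inr ⟨h1, h'.2 h1.symm⟩
  · exact absurd h1 h'.1

lemma lexLe_trans {a b c : String × Int} (h1 : lexLe a b) (h2 : lexLe b c) : lexLe a c := by
  rcases h1 with h1 | ⟨e1, l1⟩ <;> rcases h2 with h2 | ⟨e2, l2⟩
  · exact Or.inl (lt_trans h1 h2)
  · exact Or.inl (e2 ▸ h1)
  · exact Or.inl (e1 ▸ h2)
  · exact Or.inr ⟨e1.trans e2, le_trans l1 l2⟩

lemma lexLe_antisymm {a b : String × Int} (h1 : lexLe a b) (h2 : lexLe b a) : a = b := by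
  rcases h1 with h1 | ⟨e1, l1⟩ <;> rcases h2 with h2 | ⟨e2, l2⟩
  · exact absurd (lt_trans h1 h2) (lt_irrefl _)
  · exact absurd h1 (e2 ▸ lt_irrefl _)
  · exact absurd h2 (e1 ▸ lt_irrefl _)
  · exact Prod.ext e1 (le_antisymm l1 l2)

lemma insertBy_lexLe_pairwise (x : String × Int) (ys : List (String × Int))
    (h : ys.Pairwise lexLe) :
    (PySem.List.insertBy lexBefore x ys).Pairwise lexLe := by
  induction ys with
  | nil => simpa [PySem.List.insertBy] using List.pairwise_singleton _ _
  | cons y ys ih =>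
    rcases List.pairwise_cons.mp h with ⟨hy, hys⟩
    by_cases hb : lexBefore x y = true
    · have hxy : lexLe x y := lexLt_le ((lexBefore_true_iff x y).mp hb)
      simp only [PySem.List.insertBy, hb, if_true]
      refine List.pairwise_cons.mpr ⟨?_, h⟩
      intro z hz
      rcases List.mem_cons.mp hz with rfl | hz
      · exact hxy
      · exact lexLe_trans hxy (hy z hz)
    · have hb' : lexBefore x y = false := by simpa using hb
      simp only [PySem.List.insertBy, hb', Bool.false_eq_true, if_false]
      refine List.pairwise_cons.mpr ⟨?_, ih hys⟩
      intro z hz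
      rcases (PySem.List.insertBy_mem_iff lexBefore x z ys).mp hz with rfl | hz
      · exact lexLe_of_not_before hb'
      · exact hy z hz

lemma foldl_insertBy_lexLe_pairwise (xs acc : List (String × Int))
    (h : acc.Pairwise lexLe) :
    (xs.foldl (fun acc x => PySem.List.insertBy lexBefore x acc) acc).Pairwise lexLe := by
  induction xs generalizing acc with
  | nil => simpa using h
  | cons x xs ih => exact ih _ (insertBy_lexLe_pairwise x acc h)

lemma sorted2_eq_of_perm_of_pairwise (xs ys : List (String × Int))
    (hperm : ys.Perm xs) (hpair : ys.Pairwise lexLt) :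
    PySem.List.sorted2 xs (fun p => p.1) (fun p => p.2) false = ys := by
  have hdef : PySem.List.sorted2 xs (fun p => p.1) (fun p => p.2) false =
      xs.foldl (fun acc x => PySem.List.insertBy lexBefore x acc) [] := rfl
  rw [hdef]
  have h1 : (xs.foldl (fun acc x => PySem.List.insertBy lexBefore x acc) []).Perm xs := by
    simpa using PySem.List.foldl_insertBy_perm lexBefore xs []
  have h2 := foldl_insertBy_lexLe_pairwise xs [] (List.Pairwise.nil)
  exact List.eq_of_perm_of_sorted (fun a b _ _ ha hb => lexLe_antisymm ha hb)
    h2 (hpair.imp lexLt_le) (h1.trans hperm.symm)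

lemma flatMap_append_perm {α β : Type} (xs : List α) (f g : α → List β) :
    (xs.flatMap (fun i => f i ++ g i)).Perm (xs.flatMap f ++ xs.flatMap g) := by
  induction xs with
  | nil => simp
  | cons a xs ih =>
    simp only [List.flatMap_cons]
    have h1 : ((f a ++ g a) ++ xs.flatMap (fun i => f i ++ g i)).Perm
        ((f a ++ g a) ++ (xs.flatMap f ++ xs.flatMap g)) := ih.append_left _
    have h2 : ((f a ++ g a) ++ (xs.flatMap f ++ xs.flatMap g)).Perm
        ((f a ++ xs.flatMap f) ++ (g a ++ xs.flatMap g)) := by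
      simp only [List.append_assoc]
      exact (List.perm_append_comm_assoc _ _ _).append_left _
    exact h1.trans h2

def blockK (c : String) (n : Int) : List (String × Int) :=
  (PySem.List.pyRange 0 n 1).map (fun i => (c, i))

def keyT (n : Int) : List (String × Int) :=
  blockK "a" n ++ blockK "b" n ++ blockK "c" n ++ blockK "d" n

lemma keyT_perm (n : Int) :
    (keyT n).Perm ((PySem.List.pyRange 0 n 1).flatMap
      (fun i => [("a", i), ("b", i), ("c", i), ("d", i)])) := by
  refine List.Perm.symm ?_
  have h1 := flatMap_append_perm (PySem.List.pyRange 0 n 1)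
    (fun i => [(("a" : String), i)]) (fun i => [("b", i), ("c", i), ("d", i)])
  have h2 := flatMap_append_perm (PySem.List.pyRange 0 n 1)
    (fun i => [(("b" : String), i)]) (fun i => [("c", i), ("d", i)])
  have h3 := flatMap_append_perm (PySem.List.pyRange 0 n 1)
    (fun i => [(("c" : String), i)]) (fun i => [("d", i)])
  refine h1.trans ?_
  refine ((h2.trans ((h3.append_left _))).append_left _).trans ?_
  simp only [keyT, blockK, ← List.map_eq_flatMap, List.append_assoc]
  exact List.Perm.refl _

lemma blockK_pairwise (c : String) (n : Int) : (blockK c n).Pairwise lexLt := by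
  refine List.pairwise_map.mpr ?_
  exact (PySem.List.pairwise_lt_pyRange_one 0 n).imp (fun h => Or.inr ⟨rfl, h⟩)

lemma fst_mem_blockK {a : String × Int} {c : String} {n : Int}
    (h : a ∈ blockK c n) : a.1 = c := by
  rcases List.mem_map.mp h with ⟨i, _, rfl⟩; rfl

lemma lexLt_of_fst_lt {a b : String × Int} (h : a.1 < b.1) : lexLt a b := Or.inl h

lemma keyT_pairwise (n : Int) : (keyT n).Pairwise lexLt := by
  have hab : ("a" : String) < "b" := compare_gt_iff_gt.mp rfl
  have hac : ("a" : String) < "c" := compare_gt_iff_gt.mp rfl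
  have had : ("a" : String) < "d" := compare_gt_iff_gt.mp rfl
  have hbc : ("b" : String) < "c" := compare_gt_iff_gt.mp rfl
  have hbd : ("b" : String) < "d" := compare_gt_iff_gt.mp rfl
  have hcd : ("c" : String) < "d" := compare_gt_iff_gt.mp rfl
  have hcd' : (blockK "c" n ++ blockK "d" n).Pairwise lexLt :=
    List.pairwise_append.mpr ⟨blockK_pairwise _ _, blockK_pairwise _ _, fun x hx y hy =>
      lexLt_of_fst_lt (by rw [fst_mem_blockK hx, fst_mem_blockK hy]; exact hcd)⟩
  have hbcd : (blockK "b" n ++ (blockK "c" n ++ blockK "d" n)).Pairwise lexLt :=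
    List.pairwise_append.mpr ⟨blockK_pairwise _ _, hcd', fun x hx y hy => by
      rcases List.mem_append.mp hy with hy | hy
      · exact lexLt_of_fst_lt (by rw [fst_mem_blockK hx, fst_mem_blockK hy]; exact hbc)
      · exact lexLt_of_fst_lt (by rw [fst_mem_blockK hx, fst_mem_blockK hy]; exact hbd)⟩
  have habcd : (blockK "a" n ++ (blockK "b" n ++ (blockK "c" n ++ blockK "d" n))).Pairwise lexLt :=
    List.pairwise_append.mpr ⟨blockK_pairwise _ _, hbcd, fun x hx y hy => by
      rcases List.mem_append.mp hy with hy | hy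
      · exact lexLt_of_fst_lt (by rw [fst_mem_blockK hx, fst_mem_blockK hy]; exact hab)
      rcases List.mem_append.mp hy with hy | hy
      · exact lexLt_of_fst_lt (by rw [fst_mem_blockK hx, fst_mem_blockK hy]; exact hac)
      · exact lexLt_of_fst_lt (by rw [fst_mem_blockK hx, fst_mem_blockK hy]; exact had)⟩
  simpa [keyT, List.append_assoc] using habcd

lemma keyT_nodup (n : Int) : (keyT n).Nodup :=
  (keyT_pairwise n).imp (fun {a b} h he => by
    subst he; rcases h with h | ⟨_, h⟩ <;> exact lt_irrefl _ h)

lemma enum_map {α β : Type} (xs : List α) (f : α → β) (s : Int) :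
    PySem.List.enumerate (xs.map f) s = (PySem.List.enumerate xs s).map (fun p => (p.1, f p.2)) := by
  induction xs generalizing s with
  | nil => simp [PySem.List.enumerate_nil]
  | cons x xs ih => simp [PySem.List.enumerate_cons, ih]

lemma enum_range (m : Nat) (s : Int) :
    PySem.List.enumerate (List.range m) s = (List.range m).map (fun (j : Nat) => (s + (j : Int), j)) := by
  induction m with
  | zero => simp [PySem.List.enumerate_nil]
  | succ m ih =>
    rw [List.range_succ, PySem.List.enumerate_append, ih]
    simp [PySem.List.enumerate_cons, PySem.List.enumerate_nil, List.range_succ]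

lemma A_out (k : Int) :
    flower_relabel_py k = (PySem.List.enumerate (keyT (2 * k + 1)) 0).map
      (fun p => (p.2.1, p.2.2, p.1)) := by
  have hbody : (fun (acc : List (String × Int)) (i : Int) =>
      acc ++ [("a", i)] ++ [("b", i)] ++ [("c", i)] ++ [("d", i)]) =
      (fun acc i => acc ++ [("a", i), ("b", i), ("c", i), ("d", i)]) := by
    funext acc i; simp
  simp only [flower_relabel_py, hbody, PySem.List.foldl_append_eq_flatMap, List.nil_append]
  rw [sorted2_eq_of_perm_of_pairwise _ _ (keyT_perm (2 * k + 1)) (keyT_pairwise (2 * k + 1))]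
  rw [PySem.Dict.items_foldl_insert_fresh _ _ _ _
    (fun a _ => PySem.Dict.contains_empty _)
    (by rw [PySem.List.map_snd_enumerate]; exact keyT_nodup _)]
  simp [PySem.Dict.empty]

lemma B_pairs_keys_nodup (k : Int) :
    ((( PySem.List.enumerate ["a", "b", "c", "d"] 0).flatMap
      (fun p => (PySem.List.pyRange 0 (2 * k + 1) 1).map
        (fun i => ((p.2, i), p.1 * (2 * k + 1) + i)))).map (fun q => q.1)).Nodup := by
  suffices h : ((( PySem.List.enumerate ["a", "b", "c", "d"] 0).flatMap
      (fun p => (PySem.List.pyRange 0 (2 * k + 1) 1).map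
        (fun i => ((p.2, i), p.1 * (2 * k + 1) + i)))).map (fun q => q.1)) = keyT (2 * k + 1) by
    rw [h]; exact keyT_nodup _
  simp [keyT, blockK, List.map_flatMap, Function.comp_def, PySem.List.enumerate_cons,
    PySem.List.enumerate_nil]

lemma B_out (k : Int) :
    flower_relabel_py_alt k = (PySem.List.enumerate ["a", "b", "c", "d"] 0).flatMap
      (fun p => (PySem.List.pyRange 0 (2 * k + 1) 1).map
        (fun i => (p.2, i, p.1 * (2 * k + 1) + i))) := by
  simp only [flower_relabel_py_alt]
  rw [PySem.Dict.items_foldl_insert_fresh _ _ _ _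
    (fun a _ => PySem.Dict.contains_empty _) (B_pairs_keys_nodup k)]
  simp [PySem.Dict.empty, List.map_flatMap, Function.comp_def]

-- ===== VERDICT (by name: the statement is the Claim_ definition above) =====
-- ===== VERDICT (by name: the statement is the Claim_ definition above) =====
theorem flower_relabel_py_spec : Claim_equal_flower_relabel_py := by
  intro k _
  unfold Spec_flower_relabel_py
  rw [A_out, B_out]
  simp only [keyT]
  rw [PySem.List.enumerate_append, PySem.List.enumerate_append, PySem.List.enumerate_append]
  simp only [List.map_append, blockK, List.length_map,
    PySem.List.length_pyRange_one, List.length_append]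
  simp only [PySem.List.enumerate_cons, PySem.List.enumerate_nil, List.flatMap_cons,
    List.flatMap_nil, PySem.List.pyRange_one, List.map_map, Function.comp_def, List.append_nil,
    List.append_assoc]
  simp only [enum_map, enum_range, List.map_map, Function.comp_def]
  congr 1
  · apply List.map_congr_left; intro j hj; simp only [List.mem_range] at hj
    simp only [Prod.mk.injEq, true_and]; omega
  congr 1
  · apply List.map_congr_left; intro j hj; simp only [List.mem_range] at hj
    simp only [Prod.mk.injEq, true_and]; omega
  congr 1
  · apply List.map_congr_left; intro j hj; simp only [List.mem_range] at hj
    simp only [Prod.mk.injEq, true_and]; omega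
  · apply List.map_congr_left; intro j hj; simp only [List.mem_range] at hj
    simp only [Prod.mk.injEq, true_and]; omega
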